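-- pv_equiv track=rewrite | github.com/Cr4ftingMine/AdventOfCode | 2025/Day10/Day10_1.py | min_presses
-- ===== SOURCE A (Python) =====
-- from collections import deque
--
-- def to_bitmask(button, num_lights):
--     bitmask = 0
--     for b in button:
--         bitmask |= (1 << b)
--     return bitmask
--
-- def list_to_bitmask(state_list):
--     bitmask = 0
--     for i, v in enumerate(state_list):
--         if v == 1:
--             bitmask |= (1 << i)
--     return bitmask
--
-- def min_presses(target_state, button_list):
--     num_lights = len(target_state)
--
--     target_mask = list_to_bitmask(target_state)
--     button_masks = [to_bitmask(button, num_lights) for button in button_list]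
--
--     queue = deque([(0, 0)])  # (current_state, presses)
--     visited = {0}
--
--     while queue:
--         state, steps = queue.popleft()
--
--         if state == target_mask:
--             return steps
--
--         for button_mask in button_masks:
--             new_state = state ^ button_mask
--             if new_state not in visited:
--                 visited.add(new_state)
--                 queue.append((new_state, steps + 1))
--     return None
-- ===== SOURCE B (Python) =====
-- def min_presses(target_state, button_list):
--     target = 0
--     for i, v in enumerate(target_state):
--         if v == 1:
--             target |= 1 << i
--     masks = []
--     for button in button_list:
--         m = 0
--         for b in button:
--             m |= 1 << b
--         masks.append(m)
--
--     def can(r, rest, acc):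
--         if r == 0:
--             return acc == target
--         if not rest:
--             return False
--         return can(r - 1, rest[1:], acc ^ rest[0]) or can(r, rest[1:], acc)
--
--     for r in range(len(masks) + 1):
--         if can(r, masks, 0):
--             return r
--     return None
-- ===== Notes on version B (the rewrite author's own statement) =====
-- stated objective: alternative
-- what changed: Replaces the BFS over XOR states (queue + visited set) by a direct search for the smallest number of buttons whose XOR equals the target: for r = 0..n a recursive choose-or-skip enumeration of size-r button subsets, returning the first r that works.
import Mathlib
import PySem

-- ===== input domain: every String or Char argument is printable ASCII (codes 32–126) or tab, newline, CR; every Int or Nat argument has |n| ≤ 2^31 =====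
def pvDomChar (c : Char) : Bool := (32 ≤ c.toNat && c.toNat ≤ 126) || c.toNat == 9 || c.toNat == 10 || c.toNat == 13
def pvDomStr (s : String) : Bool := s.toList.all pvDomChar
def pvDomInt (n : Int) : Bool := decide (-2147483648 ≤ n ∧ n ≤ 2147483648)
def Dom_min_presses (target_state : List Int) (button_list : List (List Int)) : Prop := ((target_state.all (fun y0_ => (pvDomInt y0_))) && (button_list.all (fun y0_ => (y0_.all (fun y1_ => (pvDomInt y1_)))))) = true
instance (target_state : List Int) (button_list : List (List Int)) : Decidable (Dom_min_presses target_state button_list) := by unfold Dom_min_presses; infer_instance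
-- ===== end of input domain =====

-- B replaces A's breadth-first search over XOR states by enumerating button subsets of
-- increasing size r = 0..n and returning the first r whose XOR equals the target
-- (alternative algorithm of similar worst-case cost; return value only, no mutation).

-- ===== PORT A =====
-- Masks are kept as Nat: every mask is built from `1 << b` with b ≥ 0 (Pre_) resp. the
-- nonnegative enumerate index, and `|`/`^` of nonnegative Python ints coincide with Nat's
-- `|||`/`^^^`, so this is exact on Pre_.
def toBitmask (button : List Int) (num_lights : Int) : Nat :=
  button.foldl (fun bitmask b => bitmask ||| (1 <<< b.toNat)) 0

def listToBitmask (state_list : List Int) : Nat :=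
  (PySem.List.enumerate state_list).foldl
    (fun bitmask iv => if iv.2 = (1 : Int) then bitmask ||| (1 <<< iv.1.toNat) else bitmask) 0

-- Python's `while queue:` loop; the fuel argument only makes it total (2^n+1 iterations
-- always suffice, proved below), it changes nothing else.
-- the body of Python's `for button_mask in button_masks:` inner loop
def bfsStep (state : Nat) (steps : Int) (acc : PySem.Set Nat × List (Nat × Int))
    (button_mask : Nat) : PySem.Set Nat × List (Nat × Int) :=
  let new_state := state ^^^ button_mask
  if PySem.Set.contains acc.1 new_state then acc
  else (PySem.Set.add acc.1 new_state, acc.2 ++ [(new_state, steps + 1)])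

def bfsLoop (masks : List Nat) (target : Nat) :
    Nat → List (Nat × Int) → PySem.Set Nat → Option Int
  | 0, _, _ => none
  | _ + 1, [], _ => none
  | fuel + 1, (state, steps) :: rest, visited =>
    if state = target then some steps
    else
      let r := masks.foldl (bfsStep state steps) (visited, [])
      bfsLoop masks target fuel (rest ++ r.2) r.1

def min_presses (target_state : List Int) (button_list : List (List Int)) : Option Int :=
  let num_lights : Int := target_state.length
  let target_mask := listToBitmask target_state
  let button_masks := button_list.map (fun button => toBitmask button num_lights)
  bfsLoop button_masks target_mask (2 ^ button_masks.length + 1)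
    [(0, 0)] (PySem.Set.ofList [0])

-- ===== PORT B =====
def bTargetMask (target_state : List Int) : Nat :=
  (PySem.List.enumerate target_state).foldl
    (fun t iv => if iv.2 = (1 : Int) then t ||| (1 <<< iv.1.toNat) else t) 0

def bMasks (button_list : List (List Int)) : List Nat :=
  button_list.foldl
    (fun masks button => masks ++ [button.foldl (fun m b => m ||| (1 <<< b.toNat)) 0]) []

-- `can(r, rest, acc)`: can r masks from `rest` be XORed into `acc` to reach the target?
def canReach (target : Nat) : Nat → List Nat → Nat → Bool
  | 0, _, acc => acc == target
  | _ + 1, [], _ => false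
  | r + 1, m :: rest, acc =>
    canReach target r rest (acc ^^^ m) || canReach target (r + 1) rest acc

def min_presses_alt (target_state : List Int) (button_list : List (List Int)) : Option Int :=
  let target := bTargetMask target_state
  let masks := bMasks button_list
  match (List.range (masks.length + 1)).find? (fun r => canReach target r masks 0) with
  | some r => some (r : Int)
  | none => none

-- ===== PRECONDITION & SPEC =====
-- Pre_ excludes exactly the inputs where the Python raises: a negative button entry makes
-- `1 << b` raise ValueError (in A and in B alike).
def Pre_min_presses (target_state : List Int) (button_list : List (List Int)) : Prop :=
  ∀ button ∈ button_list, ∀ b ∈ button, 0 ≤ b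
instance (target_state : List Int) (button_list : List (List Int)) : Decidable (Pre_min_presses target_state button_list) := by unfold Pre_min_presses; infer_instance

def pvWitness_min_presses : List Int × List (List Int) := ([1, 0, 1], [[0], [0, 2], [1]])

def Spec_min_presses (target_state : List Int) (button_list : List (List Int)) (out : Option Int) : Prop := out = min_presses_alt target_state button_list
instance (target_state : List Int) (button_list : List (List Int)) (out : Option Int) : Decidable (Spec_min_presses target_state button_list out) := by unfold Spec_min_presses; infer_instance

-- ===== CLAIM (what is proved, stated in full; the proofs are below) =====
def Claim_equal_min_presses : Prop := ∀ (target_state : List Int) (button_list : List (List Int)), Dom_min_presses target_state button_list → Pre_min_presses target_state button_list → Spec_min_presses target_state button_list (min_presses target_state button_list)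

-- ===== LEMMAS AND PROOFS =====

-- XOR of a list (the value a set S of button presses moves state 0 to).
def xorAll (S : List Nat) : Nat := S.foldl (· ^^^ ·) 0

-- `RepX M x r`: x is the XOR of some r of the masks M (distinct positions).
def RepX (M : List Nat) (x : Nat) (r : Nat) : Prop :=
  ∃ S, S.Sublist M ∧ S.length = r ∧ xorAll S = x

-- `IsDist M x r`: r is the least such size.
def IsDist (M : List Nat) (x : Nat) (r : Nat) : Prop :=
  RepX M x r ∧ ∀ j, RepX M x j → r ≤ j

-- Common output characterisation both ports are proved to satisfy.
def Ans (M : List Nat) (t : Nat) (o : Option Int) : Prop :=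
  (o = none ∧ ∀ r, ¬ RepX M t r) ∨ (∃ k : Nat, o = some (k : Int) ∧ IsDist M t k)

theorem foldl_xor_init (S : List Nat) : ∀ a : Nat, S.foldl (· ^^^ ·) a = a ^^^ S.foldl (· ^^^ ·) 0 := by
  induction S with
  | nil => intro a; simp
  | cons b S ih =>
    intro a
    simp only [List.foldl_cons]
    rw [ih (a ^^^ b), ih (0 ^^^ b), Nat.zero_xor, Nat.xor_assoc]

theorem xorAll_cons (m : Nat) (S : List Nat) : xorAll (m :: S) = m ^^^ xorAll S := by
  unfold xorAll
  rw [List.foldl_cons, foldl_xor_init, Nat.zero_xor]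

theorem xorAll_perm {S T : List Nat} (h : S.Perm T) : xorAll S = xorAll T :=
  List.Perm.foldl_op_eq h

-- insertion: a sublist S avoiding the value m can be extended inside M by one m-position
theorem sublist_insert {M S : List Nat} {m : Nat} (hm : m ∈ M) (hS : S.Sublist M)
    (hnot : m ∉ S) : ∃ T, List.Sublist T M ∧ List.Perm T (m :: S) := by
  induction M generalizing S with
  | nil => cases hm
  | cons a M ih =>
    rcases List.sublist_cons_iff.mp hS with hS' | ⟨S', rfl, hS'⟩
    · by_cases hma : m = a
      · subst hma
        exact ⟨m :: S, List.Sublist.cons₂ m hS', List.Perm.refl _⟩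
      · have hmM : m ∈ M := by
          rcases List.mem_cons.mp hm with h | h
          · exact absurd h hma
          · exact h
        obtain ⟨T, hT, hp⟩ := ih hmM hS' hnot
        exact ⟨T, List.Sublist.cons a hT, hp⟩
    · have hma : m ≠ a := fun h => hnot (h ▸ List.mem_cons_self ..)
      have hmM : m ∈ M := by
        rcases List.mem_cons.mp hm with h | h
        · exact absurd h hma
        · exact h
      have hnot' : m ∉ S' := fun h => hnot (List.mem_cons_of_mem _ h)
      obtain ⟨T, hT, hp⟩ := ih hmM hS' hnot'
      refine ⟨a :: T, List.Sublist.cons₂ a hT, ?_⟩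
      exact (List.Perm.cons a hp).trans (List.Perm.swap m a S')

-- triangle step: from a size-r representation of x, x ^^^ m has one of size ≤ r + 1
theorem rep_step {M : List Nat} {x : Nat} {r : Nat} (h : RepX M x r) {m : Nat} (hm : m ∈ M) :
    ∃ r', r' ≤ r + 1 ∧ RepX M (x ^^^ m) r' := by
  obtain ⟨S, hS, hlen, hx⟩ := h
  by_cases hmem : m ∈ S
  · refine ⟨r - 1, by omega, S.erase m, (List.erase_sublist ..).trans hS, ?_, ?_⟩
    · rw [List.length_erase_of_mem hmem, hlen]
    · have hperm := xorAll_perm (List.perm_cons_erase hmem)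
      rw [xorAll_cons] at hperm
      have : m ^^^ xorAll (S.erase m) = x := by rw [← hperm, hx]
      rw [← this, Nat.xor_comm m (xorAll (S.erase m)), Nat.xor_xor_cancel_right]
  · obtain ⟨T, hT, hp⟩ := sublist_insert hm hS hmem
    refine ⟨r + 1, le_refl _, T, hT, ?_, ?_⟩
    · rw [hp.length_eq, List.length_cons, hlen]
    · rw [xorAll_perm hp, xorAll_cons, hx, Nat.xor_comm]

theorem exists_isDist {M : List Nat} {x : Nat} {r : Nat} (h : RepX M x r) :
    ∃ k, IsDist M x k := by
  induction r using Nat.strong_induction_on with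
  | _ r ih =>
    by_cases hmin : ∀ j, RepX M x j → r ≤ j
    · exact ⟨r, h, hmin⟩
    · push_neg at hmin
      obtain ⟨j, hj, hlt⟩ := hmin
      exact ih j hlt hj

theorem isDist_unique {M : List Nat} {x : Nat} {r r' : Nat}
    (h : IsDist M x r) (h' : IsDist M x r') : r = r' :=
  Nat.le_antisymm (h.2 _ h'.1) (h'.2 _ h.1)

theorem isDist_zero (M : List Nat) : IsDist M 0 0 :=
  ⟨⟨[], List.nil_sublist M, rfl, rfl⟩, fun _ _ => Nat.zero_le _⟩

theorem rep_zero_eq {M : List Nat} {x : Nat} (h : RepX M x 0) : x = 0 := by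
  obtain ⟨S, _, hlen, hx⟩ := h
  rw [List.eq_nil_iff_length_eq_zero.mpr hlen] at hx
  exact hx.symm

-- distance decomposition: a state at distance k+1 has a neighbour at distance k
theorem isDist_succ_decomp {M : List Nat} {x : Nat} {k : Nat} (h : IsDist M x (k + 1)) :
    ∃ m ∈ M, IsDist M (x ^^^ m) k := by
  obtain ⟨⟨S, hS, hlen, hx⟩, hmin⟩ := h
  cases S with
  | nil => simp at hlen
  | cons m S' =>
    have hmM : m ∈ M := hS.subset (List.mem_cons_self ..)
    have hrep : RepX M (x ^^^ m) k := by
      refine ⟨S', List.sublist_of_cons_sublist hS, by simpa using hlen, ?_⟩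
      rw [xorAll_cons] at hx
      rw [← hx, Nat.xor_comm m, Nat.xor_xor_cancel_right]
    obtain ⟨j, hdj⟩ := exists_isDist hrep
    have hjk : j ≤ k := hdj.2 _ hrep
    obtain ⟨r', hr', hrx⟩ := rep_step hdj.1 hmM
    rw [Nat.xor_xor_cancel_right] at hrx
    have : k + 1 ≤ r' := hmin _ hrx
    have : j = k := by omega
    exact ⟨m, hmM, this ▸ hdj⟩

-- ---------- B side ----------

theorem canReach_iff (t : Nat) : ∀ (rest : List Nat) (r : Nat) (acc : Nat),
    canReach t r rest acc = true ↔
      ∃ S, S.Sublist rest ∧ S.length = r ∧ acc ^^^ xorAll S = t := by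
  intro rest
  induction rest with
  | nil =>
    intro r acc
    cases r with
    | zero =>
      simp only [canReach, beq_iff_eq, List.sublist_nil]
      constructor
      · exact fun h => ⟨[], rfl, rfl, by simpa [xorAll] using h⟩
      · rintro ⟨S, rfl, -, hx⟩; simpa [xorAll] using hx
    | succ r =>
      simp only [canReach, List.sublist_nil]
      constructor
      · intro h; simp at h
      · rintro ⟨S, rfl, hlen, -⟩; simp at hlen
  | cons m rest ih =>
    intro r acc
    cases r with
    | zero =>
      simp only [canReach, beq_iff_eq]
      constructor
      · exact fun h => ⟨[], List.nil_sublist _, rfl, by simpa [xorAll] using h⟩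
      · rintro ⟨S, -, hlen, hx⟩
        rw [List.eq_nil_iff_length_eq_zero.mpr hlen] at hx
        simpa [xorAll] using hx
    | succ r =>
      simp only [canReach, Bool.or_eq_true, ih]
      constructor
      · rintro (⟨S', hS', hlen, hx⟩ | ⟨S, hS, hlen, hx⟩)
        · refine ⟨m :: S', List.Sublist.cons₂ m hS', by simp [hlen], ?_⟩
          rw [xorAll_cons, ← Nat.xor_assoc, hx]
        · exact ⟨S, List.Sublist.cons m hS, hlen, hx⟩
      · rintro ⟨S, hS, hlen, hx⟩
        rcases List.sublist_cons_iff.mp hS with hS' | ⟨S', rfl, hS'⟩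
        · exact Or.inr ⟨S, hS', hlen, hx⟩
        · refine Or.inl ⟨S', hS', by simpa using hlen, ?_⟩
          rw [xorAll_cons, ← Nat.xor_assoc] at hx
          exact hx

theorem find?_range_none {p : Nat → Bool} : ∀ {n : Nat},
    (List.range n).find? p = none → ∀ b < n, p b = false := by
  intro n
  induction n with
  | zero => intro _ b hb; omega
  | succ n ih =>
    intro h b hb
    rw [List.range_succ, List.find?_append] at h
    obtain ⟨h1, h2⟩ := Option.or_eq_none_iff.mp h
    rcases Nat.lt_succ_iff_lt_or_eq.mp hb with hb' | rfl
    · exact ih h1 b hb'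
    · by_cases hp : p b
      · simp [List.find?, hp] at h2
      · exact (Bool.not_eq_true (p b)) ▸ hp

theorem find?_range_some {p : Nat → Bool} : ∀ {n a : Nat},
    (List.range n).find? p = some a → p a = true ∧ ∀ b < a, p b = false := by
  intro n
  induction n with
  | zero => intro a h; simp at h
  | succ n ih =>
    intro a h
    rw [List.range_succ, List.find?_append] at h
    cases hfind : (List.range n).find? p with
    | some c =>
      rw [hfind] at h
      rw [Option.some_or] at h
      exact ih (hfind.trans h)
    | none =>
      rw [hfind] at h
      simp only [Option.none_or] at h
      by_cases hp : p n
      · simp [List.find?, hp] at h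
        subst h
        exact ⟨hp, fun b hb => find?_range_none hfind b hb⟩
      · simp [List.find?, hp] at h

theorem alt_ans (target_state : List Int) (button_list : List (List Int)) :
    Ans (bMasks button_list) (bTargetMask target_state)
      (min_presses_alt target_state button_list) := by
  have hgoal : min_presses_alt target_state button_list =
      match (List.range ((bMasks button_list).length + 1)).find?
          (fun r => canReach (bTargetMask target_state) r (bMasks button_list) 0) with
      | some r => some (r : Int)
      | none => none := rfl
  cases hf : (List.range ((bMasks button_list).length + 1)).find?
      (fun r => canReach (bTargetMask target_state) r (bMasks button_list) 0) with
  | none =>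
    rw [hgoal, hf]
    refine Or.inl ⟨rfl, ?_⟩
    rintro r ⟨S, hS, hlen, hx⟩
    have hr : r < (bMasks button_list).length + 1 := by
      have := hS.length_le; omega
    have hcan : canReach (bTargetMask target_state) r (bMasks button_list) 0 = true :=
      (canReach_iff _ _ r 0).mpr ⟨S, hS, hlen, by rw [Nat.zero_xor]; exact hx⟩
    rw [find?_range_none hf r hr] at hcan
    cases hcan
  | some r =>
    rw [hgoal, hf]
    obtain ⟨hp, hmin⟩ := find?_range_some hf
    obtain ⟨S, hS, hlen, hx⟩ := (canReach_iff _ _ r 0).mp hp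
    refine Or.inr ⟨r, rfl, ⟨S, hS, hlen, by rwa [Nat.zero_xor] at hx⟩, ?_⟩
    intro j hj
    by_contra hcon
    have hjr : j < r := by omega
    obtain ⟨S', hS', hlen', hx'⟩ := hj
    have : canReach (bTargetMask target_state) j (bMasks button_list) 0 = true :=
      (canReach_iff _ _ j 0).mpr ⟨S', hS', hlen', by rw [Nat.zero_xor]; exact hx'⟩
    rw [hmin j hjr] at this
    cases this

-- ---------- A side ----------

-- The BFS loop invariant: V the visited set, P the processed (dequeued) states, q the queue.
def BfsInv (M : List Nat) (t : Nat) (q : List (Nat × Int)) (V P : List Nat) : Prop :=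
  V.Nodup ∧ (q.map Prod.fst).Nodup ∧ P.Nodup ∧
  (∀ x, x ∈ V ↔ x ∈ P ∨ x ∈ q.map Prod.fst) ∧
  (∀ p ∈ P, p ∉ q.map Prod.fst) ∧
  0 ∈ V ∧
  (∀ p ∈ P, p ≠ t ∧ ∀ m ∈ M, p ^^^ m ∈ V) ∧
  (∀ x ∈ V, ∃ r, RepX M x r) ∧
  (∀ e ∈ q, ∃ r : Nat, e.2 = (r : Int) ∧ IsDist M e.1 r) ∧
  (q = [] ∨ ∃ (k : Nat) (q1 q2 : List (Nat × Int)), q = q1 ++ q2 ∧ q1 ≠ [] ∧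
    (∀ e ∈ q1, e.2 = (k : Int)) ∧ (∀ e ∈ q2, e.2 = (k : Int) + 1) ∧
    (∀ x r, IsDist M x r → (r < k → x ∈ P) ∧ (r = k → x ∈ V)))

theorem card_processed {M : List Nat} {t : Nat} {q : List (Nat × Int)} {V P : List Nat}
    (h : BfsInv M t q V P) : P.length ≤ 2 ^ M.length := by
  obtain ⟨hV, hqs, hP, hiff, hdisj, h0, hproc, hrep, hq, hlvl⟩ := h
  have hsub : P ⊆ (M.sublists.map xorAll) := by
    intro p hp
    obtain ⟨r, S, hS, hlen, hx⟩ := hrep p ((hiff p).mpr (Or.inl hp))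
    exact List.mem_map.mpr ⟨S, List.mem_sublists.mpr hS, hx⟩
  have := (List.subperm_of_subset hP hsub).length_le
  simpa [List.length_sublists] using this

theorem bfsStep_eq (s : Nat) (steps : Int) (W : List Nat) (out : List (Nat × Int))
    (bm : Nat) :
    bfsStep s steps (W, out) bm =
      if s ^^^ bm ∈ W then (W, out)
      else (W ++ [s ^^^ bm], out ++ [(s ^^^ bm, steps + 1)]) := by
  by_cases h : s ^^^ bm ∈ W <;>
    simp [bfsStep, PySem.Set.add, PySem.Set.contains,
      List.contains_eq_mem, h]

theorem fold_spec (s : Nat) (steps : Int) :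
    ∀ (ms : List Nat) (W : List Nat) (out : List (Nat × Int)), W.Nodup →
    ∃ app : List (Nat × Int),
      ms.foldl (bfsStep s steps) (W, out) = (W ++ app.map Prod.fst, out ++ app) ∧
      (W ++ app.map Prod.fst).Nodup ∧
      (∀ e ∈ app, e.2 = steps + 1 ∧ e.1 ∉ W ∧ ∃ m ∈ ms, e.1 = s ^^^ m) ∧
      (∀ m ∈ ms, s ^^^ m ∈ W ++ app.map Prod.fst) := by
  intro ms
  induction ms with
  | nil =>
    intro W out hW
    exact ⟨[], by simp, by simpa using hW, by simp, by simp⟩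
  | cons m ms ih =>
    intro W out hW
    rw [List.foldl_cons, bfsStep_eq]
    by_cases hmem : s ^^^ m ∈ W
    · rw [if_pos hmem]
      obtain ⟨app, heq, hnd, hprop, hall⟩ := ih W out hW
      refine ⟨app, heq, hnd, ?_, ?_⟩
      · intro e he
        obtain ⟨h1, h2, m', hm', h3⟩ := hprop e he
        exact ⟨h1, h2, m', List.mem_cons_of_mem _ hm', h3⟩
      · intro m' hm'
        rcases List.mem_cons.mp hm' with rfl | hm'
        · exact List.mem_append_left _ hmem
        · exact hall m' hm'
    · rw [if_neg hmem]
      have hW' : (W ++ [s ^^^ m]).Nodup := by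
        simp only [List.nodup_append, List.nodup_singleton, true_and]
        constructor
        · exact hW
        · intro a ha b hb heq
          rw [List.mem_singleton] at hb
          rw [hb] at heq
          rw [heq] at ha
          exact hmem ha
      obtain ⟨app, heq, hnd, hprop, hall⟩ :=
        ih (W ++ [s ^^^ m]) (out ++ [(s ^^^ m, steps + 1)]) hW'
      refine ⟨(s ^^^ m, steps + 1) :: app, ?_, ?_, ?_, ?_⟩
      · rw [heq]; simp
      · simpa using hnd
      · intro e he
        rcases List.mem_cons.mp he with rfl | he
        · exact ⟨rfl, hmem, m, List.mem_cons_self .., rfl⟩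
        · obtain ⟨h1, h2, m', hm', h3⟩ := hprop e he
          refine ⟨h1, fun hc => h2 (List.mem_append_left _ hc), m',
            List.mem_cons_of_mem _ hm', h3⟩
      · intro m' hm'
        rcases List.mem_cons.mp hm' with rfl | hm'
        · simp
        · have := hall m' hm'
          simpa [List.append_assoc] using this

theorem bfs_main (M : List Nat) (t : Nat) :
    ∀ (fuel : Nat) (q : List (Nat × Int)) (V P : List Nat),
      BfsInv M t q V P → 2 ^ M.length + 1 ≤ fuel + P.length →
      Ans M t (bfsLoop M t fuel q V) := by
  intro fuel
  induction fuel with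
  | zero =>
    intro q V P hinv hle
    have := card_processed hinv
    omega
  | succ fuel ih =>
    intro q V P hinv hle
    match q with
    | [] =>
      obtain ⟨hV, hqs, hP, hiff, hdisj, h0, hproc, hrep, hq, hlvl⟩ := hinv
      have hnone : bfsLoop M t (fuel + 1) [] V = none := rfl
      rw [hnone]
      refine Or.inl ⟨rfl, ?_⟩
      have hclosed : ∀ S, S.Sublist M → xorAll S ∈ V := by
        intro S hS
        induction S with
        | nil => exact h0
        | cons m S' ihS =>
          have hm : m ∈ M := hS.subset (List.mem_cons_self ..)
          have hS' : S'.Sublist M := List.sublist_of_cons_sublist hS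
          have hy : xorAll S' ∈ V := ihS hS'
          have hyP : xorAll S' ∈ P := by
            rcases (hiff _).mp hy with h | h
            · exact h
            · simp at h
          have := (hproc _ hyP).2 m hm
          rw [xorAll_cons, Nat.xor_comm]
          exact this
      rintro r ⟨S, hS, hlen, hx⟩
      have ht : t ∈ V := hx ▸ hclosed S hS
      have htP : t ∈ P := by
        rcases (hiff _).mp ht with h | h
        · exact h
        · simp at h
      exact (hproc _ htP).1 rfl
    | (s, steps) :: rest =>
      obtain ⟨hV, hqs, hP, hiff, hdisj, h0, hproc, hrep, hq, hlvl⟩ := hinv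
      obtain ⟨k0, hk0, hds0⟩ := hq (s, steps) (List.mem_cons_self ..)
      rw [bfsLoop]
      by_cases hst : s = t
      · subst hst
        rw [if_pos rfl]
        exact Or.inr ⟨k0, congrArg some hk0, hds0⟩
      · rw [if_neg hst]
        rcases hlvl with hnil | ⟨k, q1, q2, hqeq, hq1ne, hq1s, hq2s, hlev⟩
        · cases hnil
        cases q1 with
        | nil => exact absurd rfl hq1ne
        | cons e0 q1' =>
        rw [List.cons_append] at hqeq
        injection hqeq with he0 hrest
        subst he0
        have hsk : steps = (k : Int) := hq1s (s, steps) (List.mem_cons_self ..)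
        have hk0' : steps = (k0 : Int) := hk0
        have hk0k : k0 = k := by
          rw [hsk] at hk0'
          exact_mod_cast hk0'.symm
        subst hk0k
        have hds : IsDist M s k0 := hds0
        clear hds0
        obtain ⟨app, heq, hnd, hprop, hall⟩ := fold_spec s steps M V [] hV
        rw [List.nil_append] at heq
        simp only [heq]
        -- membership preliminaries
        have hsq : s ∈ (((s, steps) :: rest).map Prod.fst) := by
          simp
        have hsV : s ∈ V := (hiff s).mpr (Or.inr hsq)
        have hVapp : ∀ x ∈ app.map Prod.fst, x ∉ V := by
          intro x hx hxV
          obtain ⟨e, he, he1⟩ := List.mem_map.mp hx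
          obtain ⟨-, hnotV, -⟩ := hprop e he
          rw [he1] at hnotV
          exact hnotV hxV
        have happnd : (app.map Prod.fst).Nodup := List.Nodup.of_append_right hnd
        have hrestnd : (rest.map Prod.fst).Nodup := by
          rw [List.map_cons] at hqs
          exact List.Nodup.of_cons hqs
        have hsnotrest : s ∉ rest.map Prod.fst := by
          rw [List.map_cons] at hqs
          exact (List.nodup_cons.mp hqs).1
        have hrestV : ∀ x ∈ rest.map Prod.fst, x ∈ V := by
          intro x hx
          exact (hiff x).mpr (Or.inr (by simp [hx]))
        have hsP : s ∉ P := fun hc => hdisj s hc hsq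
        -- distances of the newly discovered states
        have hdist_app : ∀ e ∈ app, IsDist M e.1 (k0 + 1) := by
          intro e he
          obtain ⟨he2, hnotV, m, hm, he1⟩ := hprop e he
          obtain ⟨r', hr', hrep'⟩ := rep_step hds.1 hm
          obtain ⟨j, hdj⟩ := exists_isDist hrep'
          have hj : j ≤ k0 + 1 := le_trans (hdj.2 _ hrep') hr'
          have hdj' : IsDist M e.1 j := by rw [he1]; exact hdj
          have hnk : ¬ j < k0 := by
            intro hlt
            exact hnotV ((hiff e.1).mpr (Or.inl ((hlev e.1 j hdj').1 hlt)))
          have hne : ¬ j = k0 := by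
            intro heqj
            exact hnotV ((hlev e.1 j hdj').2 heqj)
          have : j = k0 + 1 := by omega
          rw [← this]
          exact hdj'
        have happ_steps : ∀ e ∈ app, e.2 = ((k0 : Int) + 1) := by
          intro e he
          rw [(hprop e he).1, hsk]
        -- the invariant for the next iteration
        have hinv' : BfsInv M t (rest ++ app) (V ++ app.map Prod.fst) (s :: P) := by
          refine ⟨hnd, ?_, ?_, ?_, ?_, ?_, ?_, ?_, ?_, ?_⟩
          · -- queue states nodup
            rw [List.map_append]
            refine List.Nodup.append hrestnd happnd ?_
            intro x hx hx'
            exact hVapp x hx' (hrestV x hx)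
          · exact List.nodup_cons.mpr ⟨hsP, hP⟩
          · -- membership iff
            intro x
            have hold := hiff x
            rw [List.map_cons, List.mem_cons] at hold
            rw [List.mem_append, hold, List.map_append, List.mem_append,
              List.mem_cons]
            tauto
          · -- processed disjoint from queue
            intro p hp
            rw [List.map_append, List.mem_append]
            rcases List.mem_cons.mp hp with rfl | hp'
            · rintro (h | h)
              · exact hsnotrest h
              · exact hVapp p h hsV
            · rintro (h | h)
              · exact hdisj p hp' (by simp [h])
              · exact hVapp p h ((hiff p).mpr (Or.inl hp'))
          · exact List.mem_append_left _ h0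
          · -- processed states are closed and are not the target
            intro p hp
            rcases List.mem_cons.mp hp with rfl | hp'
            · exact ⟨hst, fun m hm => hall m hm⟩
            · exact ⟨(hproc p hp').1,
                fun m hm => List.mem_append_left _ ((hproc p hp').2 m hm)⟩
          · -- every visited state is representable
            intro x hx
            rcases List.mem_append.mp hx with hx' | hx'
            · exact hrep x hx'
            · obtain ⟨e, he, he1⟩ := List.mem_map.mp hx'
              exact ⟨k0 + 1, he1 ▸ (hdist_app e he).1⟩
          · -- queue entries carry their true distance
            intro e he
            rcases List.mem_append.mp he with he' | he'
            · exact hq e (List.mem_cons_of_mem _ he')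
            · refine ⟨k0 + 1, ?_, hdist_app e he'⟩
              rw [happ_steps e he']
              push_cast
              ring
          · -- level structure
            cases q1' with
            | cons f q1'' =>
              refine Or.inr ⟨k0, f :: q1'', q2 ++ app, ?_, by simp, ?_, ?_, ?_⟩
              · rw [hrest, List.append_assoc]
              · intro e' he'
                exact hq1s e' (List.mem_cons_of_mem _ he')
              · intro e' he'
                rcases List.mem_append.mp he' with h | h
                · exact hq2s e' h
                · exact happ_steps e' h
              · intro x r hd
                exact ⟨fun hlt => List.mem_cons_of_mem _ ((hlev x r hd).1 hlt),
                  fun heqr => List.mem_append_left _ ((hlev x r hd).2 heqr)⟩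
            | nil =>
              rw [List.nil_append] at hrest
              subst hrest
              by_cases hemp : rest ++ app = []
              · exact Or.inl hemp
              refine Or.inr ⟨k0 + 1, rest ++ app, [], by rw [List.append_nil],
                hemp, ?_, by simp, ?_⟩
              · intro e' he'
                rcases List.mem_append.mp he' with h | h
                · rw [hq2s e' h]; push_cast; ring
                · rw [happ_steps e' h]; push_cast; ring
              · intro x r hd
                have hrestdist : ∀ y ∈ rest.map Prod.fst, IsDist M y (k0 + 1) := by
                  intro y hy
                  obtain ⟨e', he', he1⟩ := List.mem_map.mp hy
                  obtain ⟨r0, hr0, hdr0⟩ := hq e' (List.mem_cons_of_mem _ he')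
                  have : r0 = k0 + 1 := by
                    rw [hq2s e' he'] at hr0
                    exact_mod_cast hr0.symm
                  rw [← he1, ← this]
                  exact hdr0
                constructor
                · intro hlt
                  by_cases hrk : r < k0
                  · exact List.mem_cons_of_mem _ ((hlev x r hd).1 hrk)
                  · have hr : r = k0 := by omega
                    have hxV : x ∈ V := (hlev x r hd).2 hr
                    rcases (hiff x).mp hxV with h | h
                    · exact List.mem_cons_of_mem _ h
                    · rw [List.map_cons, List.mem_cons] at h
                      rcases h with rfl | h
                      · exact List.mem_cons_self ..
                      · have := isDist_unique hd (hrestdist x h)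
                        omega
                · intro heqr
                  subst heqr
                  obtain ⟨m, hm, hdy⟩ := isDist_succ_decomp hd
                  have hyV : x ^^^ m ∈ V := (hlev _ k0 hdy).2 rfl
                  rcases (hiff _).mp hyV with h | h
                  · have := (hproc _ h).2 m hm
                    rw [Nat.xor_xor_cancel_right] at this
                    exact List.mem_append_left _ this
                  · rw [List.map_cons, List.mem_cons] at h
                    rcases h with hxs | h
                    · have hxs' : x ^^^ m = s := hxs
                      have := hall m hm
                      rw [← hxs', Nat.xor_xor_cancel_right] at this
                      exact this
                    · have := isDist_unique hdy (hrestdist _ h)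
                      omega
        have hle' : 2 ^ M.length + 1 ≤ fuel + (s :: P).length := by
          rw [List.length_cons]
          omega
        exact ih (rest ++ app) (V ++ app.map Prod.fst) (s :: P) hinv' hle'

theorem a_ans (target_state : List Int) (button_list : List (List Int)) :
    Ans (button_list.map (fun button => toBitmask button (target_state.length : Int)))
        (listToBitmask target_state)
        (min_presses target_state button_list) := by
  have hred : min_presses target_state button_list =
      bfsLoop
        (button_list.map (fun button => toBitmask button (target_state.length : Int)))
        (listToBitmask target_state)
        (2 ^ (button_list.map
          (fun button => toBitmask button (target_state.length : Int))).length + 1)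
        [(0, 0)] (PySem.Set.ofList [0]) := rfl
  have hV0 : (PySem.Set.ofList [0] : PySem.Set Nat) = [0] := rfl
  rw [hred, hV0]
  refine bfs_main _ _ _ _ _ [] ?_ ?_
  · refine ⟨by simp, by simp, by simp, by simp, by simp, by simp, by simp, ?_, ?_, ?_⟩
    · intro x hx
      rw [List.mem_singleton] at hx
      exact ⟨0, [], List.nil_sublist _, rfl, hx.symm⟩
    · intro e he
      rw [List.mem_singleton] at he
      subst he
      exact ⟨0, by simp, isDist_zero _⟩
    · refine Or.inr ⟨0, [(0, 0)], [], by simp, by simp, by simp, by simp, ?_⟩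
      intro x r hd
      refine ⟨fun h => absurd h (Nat.not_lt_zero r), fun h0 => ?_⟩
      subst h0
      rw [List.mem_singleton]
      exact rep_zero_eq hd.1
  · simp

-- ---------- glue ----------

theorem bMasks_eq (button_list : List (List Int)) (nl : Int) :
    bMasks button_list = button_list.map (fun button => toBitmask button nl) := by
  unfold bMasks toBitmask
  simpa using PySem.List.foldl_append_singleton_eq_map
    (fun (button : List Int) => button.foldl (fun m b => m ||| (1 <<< b.toNat)) 0)
    button_list []

theorem ans_unique {M : List Nat} {t : Nat} {o o' : Option Int}
    (h : Ans M t o) (h' : Ans M t o') : o = o' := by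
  rcases h with ⟨ho, hnone⟩ | ⟨k, ho, hd⟩ <;>
    rcases h' with ⟨ho', hnone'⟩ | ⟨k', ho', hd'⟩
  · rw [ho, ho']
  · exact absurd hd'.1 (hnone k')
  · exact absurd hd.1 (hnone' k)
  · rw [ho, ho', isDist_unique hd hd']

-- ===== VERDICT (by name: the statement is the Claim_ definition above) =====
theorem min_presses_spec : Claim_equal_min_presses := by
  intro target_state button_list _ _
  unfold Spec_min_presses
  have hA := a_ans target_state button_list
  have hB := alt_ans target_state button_list
  rw [bMasks_eq button_list (target_state.length : Int)] at hB
  exact ans_unique hA (by exact hB)
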